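-- pv_equiv track=rewrite | github.com/itaifish/project-euler-solutions | extra-solves/problem23.py | get_divisors_from_prime_factors
-- ===== SOURCE A (Python) =====
-- from itertools import combinations, combinations_with_replacement
-- from typing import Dict, List
--
-- def get_divisors_from_prime_factors(prime_factors: List[int]):
-- 	divisors: set[int] = set()
-- 	for i in range(len(prime_factors)):
-- 		combos = combinations(prime_factors, i)
-- 		for combo in combos:
-- 			divisor = 1
-- 			for number in combo:
-- 				divisor *= number
-- 			divisors.add(divisor)
-- 	return divisors
-- ===== SOURCE B (Python) =====
-- def _choices(rest):
--     # all ways to pick one factor from rest, paired with the factors after it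
--     out = []
--     while rest:
--         x, rest = rest[0], rest[1:]
--         out.append((x, rest))
--     return out
--
--
-- def get_divisors_from_prime_factors(prime_factors):
--     n = len(prime_factors)
--     divisors = set()
--     if n == 0:
--         return divisors
--     divisors.add(1)
--     # layer: (product of the chosen factors, factors still usable after the last chosen one)
--     layer = [(1, prime_factors)]
--     for _ in range(1, n):
--         nxt = []
--         for prod, rest in layer:
--             for x, tail in _choices(rest):
--                 d = prod * x
--                 divisors.add(d)
--                 nxt.append((d, tail))
--         layer = nxt
--     return divisors
-- ===== Notes on version B (the rewrite author's own statement) =====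
-- stated objective: alternative
-- what changed: replaces itertools.combinations with a fresh inner product loop per combination by a breadth-first layer expansion (partial product, usable suffix) that derives each combination's product from its parent with one multiplication
import Mathlib
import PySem

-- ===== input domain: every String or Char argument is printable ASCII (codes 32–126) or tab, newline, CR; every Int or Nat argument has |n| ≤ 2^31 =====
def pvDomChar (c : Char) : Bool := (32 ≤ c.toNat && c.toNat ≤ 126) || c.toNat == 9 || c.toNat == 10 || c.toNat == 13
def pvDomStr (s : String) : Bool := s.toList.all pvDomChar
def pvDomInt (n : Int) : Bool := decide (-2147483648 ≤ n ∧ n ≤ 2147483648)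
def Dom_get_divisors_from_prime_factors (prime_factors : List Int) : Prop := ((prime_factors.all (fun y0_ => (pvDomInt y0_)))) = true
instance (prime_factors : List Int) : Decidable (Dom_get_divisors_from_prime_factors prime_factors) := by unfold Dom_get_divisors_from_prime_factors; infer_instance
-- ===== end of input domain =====

-- B replaces the combinations+inner-product-loop enumeration by a breadth-first layer expansion
-- computing each combination's product incrementally from its parent (alternative decomposition).

-- ===== PORT A =====
def get_divisors_from_prime_factors (prime_factors : List Int) : List Int :=
  (PySem.List.pyRange 0 (PySem.List.len prime_factors) 1).foldl
    (fun divisors i =>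
      (PySem.List.combinations prime_factors i.toNat).foldl
        (fun ds combo =>
          PySem.Set.add ds (combo.foldl (fun divisor number => divisor * number) 1))
        divisors)
    PySem.Set.empty

-- ===== PORT B =====
-- while-loop of _choices: 'x, rest = rest[0], rest[1:]' is head/tail destructuring (exact: rest is nonempty there)
def pvChoices : List Int → List (Int × List Int) → List (Int × List Int)
  | [], out => out
  | x :: r, out => pvChoices r (out ++ [(x, r)])

def get_divisors_from_prime_factors_alt (prime_factors : List Int) : List Int :=
  let n := PySem.List.len prime_factors
  let divisors : PySem.Set Int := PySem.Set.empty
  if n == 0 then divisors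
  else
    let divisors := PySem.Set.add divisors 1
    let layer : List (Int × List Int) := [(1, prime_factors)]
    let st := (PySem.List.pyRange 1 n 1).foldl
      (fun (st : PySem.Set Int × List (Int × List Int)) _ =>
        st.2.foldl
          (fun (acc : PySem.Set Int × List (Int × List Int)) pr =>
            (pvChoices pr.2 []).foldl
              (fun (acc2 : PySem.Set Int × List (Int × List Int)) q =>
                let d := pr.1 * q.1
                (PySem.Set.add acc2.1 d, acc2.2 ++ [(d, q.2)]))
              acc)
          (st.1, []))
      (divisors, layer)
    st.1

-- ===== PRECONDITION & SPEC =====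
def Spec_get_divisors_from_prime_factors (prime_factors : List Int) (out : List Int) : Prop := out = get_divisors_from_prime_factors_alt prime_factors
instance (prime_factors : List Int) (out : List Int) : Decidable (Spec_get_divisors_from_prime_factors prime_factors out) := by unfold Spec_get_divisors_from_prime_factors; infer_instance

-- ===== CLAIM (what is proved, stated in full; the proofs are below) =====
def Claim_equal_get_divisors_from_prime_factors : Prop := ∀ (prime_factors : List Int), Dom_get_divisors_from_prime_factors prime_factors → Spec_get_divisors_from_prime_factors prime_factors (get_divisors_from_prime_factors prime_factors)

-- ===== LEMMAS AND PROOFS =====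

/-- product of a combination, as A computes it -/
def prodF (c : List Int) : Int := c.foldl (fun d x => d * x) 1

/-- combinations (index-lexicographic) paired with the part of the list after the last chosen element -/
def combosT : List Int → Nat → List (List Int × List Int)
  | xs, 0 => [([], xs)]
  | [], _+1 => []
  | x :: xs, r+1 => (combosT xs r).map (fun p => (x :: p.1, p.2)) ++ combosT xs (r+1)

def gmapP (p : List Int × List Int) : Int × List Int := (prodF p.1, p.2)

def newLayer (L : List (Int × List Int)) : List (Int × List Int) :=
  L.flatMap (fun pr => (pvChoices pr.2 []).map (fun q => (pr.1 * q.1, q.2)))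

def iterLayer (L : List (Int × List Int)) : Nat → List (Int × List Int)
  | 0 => L
  | m+1 => iterLayer (newLayer L) m

def iterSeq (L : List (Int × List Int)) : Nat → List Int
  | 0 => []
  | m+1 => (newLayer L).map Prod.fst ++ iterSeq (newLayer L) m

theorem pvChoices_out (t : List Int) : ∀ out, pvChoices t out = out ++ pvChoices t [] := by
  induction t with
  | nil => intro out; simp [pvChoices]
  | cons x r ih =>
    intro out
    simp only [pvChoices, List.nil_append]
    rw [ih (out ++ [(x, r)]), ih [(x, r)], List.append_assoc]

theorem combosT_fst (xs : List Int) : ∀ r, (combosT xs r).map Prod.fst = PySem.List.combinations xs r := by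
  induction xs with
  | nil =>
    intro r
    cases r with
    | zero => simp [combosT, PySem.List.combinations_zero]
    | succ r => simp [combosT, PySem.List.combinations_nil_succ]
  | cons x xs ih =>
    intro r
    cases r with
    | zero => simp [combosT, PySem.List.combinations_zero]
    | succ r =>
      rw [PySem.List.combinations_cons_succ, ← ih r, ← ih (r+1)]
      simp [combosT, List.map_map, Function.comp_def]

theorem combosT_succ (xs : List Int) : ∀ r, combosT xs (r+1) =
    (combosT xs r).flatMap (fun p => (pvChoices p.2 []).map (fun q => (p.1 ++ [q.1], q.2))) := by
  induction xs with
  | nil =>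
    intro r
    cases r with
    | zero => simp [combosT, pvChoices]
    | succ r => simp [combosT]
  | cons x xs ih =>
    intro r
    cases r with
    | zero =>
      simp only [combosT, List.map_nil, List.flatMap_cons, List.flatMap_nil, List.map_cons,
        List.nil_append, List.append_nil, ih 0]
      rw [show pvChoices (x :: xs) [] = pvChoices xs [(x, xs)] from rfl,
        pvChoices_out xs [(x, xs)]]
      simp
    | succ r =>
      simp only [combosT]
      rw [List.flatMap_append, ← ih (r+1), ih r]
      simp [List.flatMap_map, List.map_flatMap, List.map_map, Function.comp_def, List.cons_append]

theorem prodF_snoc (c : List Int) (x : Int) : prodF (c ++ [x]) = prodF c * x := by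
  simp [prodF, List.foldl_append]

theorem update_foldl_flat {β : Type} (l : List β) (F : β → List Int) :
    ∀ s : PySem.Set Int, l.foldl (fun s e => PySem.Set.update s (F e)) s = PySem.Set.update s (l.flatMap F) := by
  induction l with
  | nil => intro s; simp [PySem.Set.update_nil]
  | cons e l ih => intro s; simp [List.flatMap_cons, PySem.Set.update_append, ih]

theorem A_loop (pf : List Int) (ks : List Nat) (s : PySem.Set Int) :
    ks.foldl (fun s i => (PySem.List.combinations pf i).foldl
        (fun ds c => PySem.Set.add ds (prodF c)) s) s
    = PySem.Set.update s (ks.flatMap (fun i => (PySem.List.combinations pf i).map prodF)) := by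
  simp only [← PySem.Set.update_map_eq_foldl_add]
  exact update_foldl_flat ks _ s

theorem A_norm (pf : List Int) :
    get_divisors_from_prime_factors pf
    = PySem.Set.update PySem.Set.empty
        ((List.range pf.length).flatMap (fun i => (PySem.List.combinations pf i).map prodF)) := by
  unfold get_divisors_from_prime_factors
  rw [PySem.List.len_eq, PySem.List.pyRange_one, List.foldl_map]
  simp only [zero_add, Int.toNat_natCast, sub_zero]
  exact A_loop pf (List.range pf.length) PySem.Set.empty

theorem inner_fold (p : Int) (t : List Int) (a : PySem.Set Int) (b : List (Int × List Int)) :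
    (pvChoices t []).foldl
      (fun acc2 q => (PySem.Set.add acc2.1 (p * q.1), acc2.2 ++ [(p * q.1, q.2)])) (a, b)
    = (PySem.Set.update a ((pvChoices t []).map (fun q => p * q.1)),
       b ++ (pvChoices t []).map (fun q => (p * q.1, q.2))) := by
  have h := PySem.List.foldl_prod_mk
    (f := fun (s : PySem.Set Int) (q : Int × List Int) => PySem.Set.add s (p * q.1))
    (g := fun (c : List (Int × List Int)) (q : Int × List Int) => c ++ [(p * q.1, q.2)])
    (l := pvChoices t []) (a := a) (b := b)
  rw [← PySem.Set.update_map_eq_foldl_add, PySem.List.foldl_append_singleton_eq_map] at h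
  exact h

theorem layer_fold (L : List (Int × List Int)) : ∀ (D : PySem.Set Int) (b0 : List (Int × List Int)),
    L.foldl
      (fun acc pr => (pvChoices pr.2 []).foldl
        (fun acc2 q => (PySem.Set.add acc2.1 (pr.1 * q.1), acc2.2 ++ [(pr.1 * q.1, q.2)])) acc)
      (D, b0)
    = (PySem.Set.update D ((newLayer L).map Prod.fst), b0 ++ newLayer L) := by
  induction L with
  | nil => intro D b0; simp [newLayer, PySem.Set.update_nil]
  | cons pr L ih =>
    intro D b0
    simp only [List.foldl_cons]
    rw [inner_fold, ih]
    simp [newLayer, PySem.Set.update_append, List.map_map, Function.comp_def, List.append_assoc]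

theorem size_loop (ls : List Int) : ∀ (D : PySem.Set Int) (L : List (Int × List Int)),
    ls.foldl
      (fun st _ => st.2.foldl
        (fun acc pr => (pvChoices pr.2 []).foldl
          (fun acc2 q => (PySem.Set.add acc2.1 (pr.1 * q.1), acc2.2 ++ [(pr.1 * q.1, q.2)])) acc)
        (st.1, []))
      (D, L)
    = (PySem.Set.update D (iterSeq L ls.length), iterLayer L ls.length) := by
  induction ls with
  | nil => intro D L; simp [iterSeq, iterLayer, PySem.Set.update_nil]
  | cons a ls ih =>
    intro D L
    simp only [List.foldl_cons]
    rw [layer_fold, List.nil_append, ih]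
    simp [iterSeq, iterLayer, PySem.Set.update_append]

theorem newLayer_combosT (pf : List Int) (s : Nat) :
    newLayer ((combosT pf s).map gmapP) = (combosT pf (s+1)).map gmapP := by
  rw [combosT_succ]
  simp [newLayer, gmapP, List.flatMap_map, List.map_flatMap, List.map_map, Function.comp_def,
    prodF_snoc]

theorem iterSeq_combosT (pf : List Int) : ∀ (m s : Nat),
    iterSeq ((combosT pf s).map gmapP) m
    = (List.range m).flatMap (fun j => (PySem.List.combinations pf (s+1+j)).map prodF) := by
  intro m
  induction m with
  | zero => intro s; simp [iterSeq]
  | succ m ih =>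
    intro s
    simp only [iterSeq]
    rw [newLayer_combosT]
    have hfst : ((combosT pf (s+1)).map gmapP).map Prod.fst
        = (PySem.List.combinations pf (s+1)).map prodF := by
      rw [← combosT_fst]
      simp [gmapP, List.map_map, Function.comp_def]
    rw [hfst, ih (s+1), List.range_succ_eq_map]
    simp only [List.flatMap_cons, List.flatMap_map, Nat.add_zero]
    have harr : ∀ (a : Nat), s + 1 + 1 + a = s + 1 + a.succ := fun a => by omega
    simp only [harr]

theorem combosT_zero (xs : List Int) : combosT xs 0 = [([], xs)] := by
  cases xs <;> rfl

theorem B_norm (pf : List Int) (h : pf ≠ []) :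
    get_divisors_from_prime_factors_alt pf
    = PySem.Set.update (PySem.Set.add PySem.Set.empty 1)
        ((List.range (pf.length - 1)).flatMap (fun j => (PySem.List.combinations pf (j+1)).map prodF)) := by
  have hl : pf.length ≠ 0 := by simpa [List.length_eq_zero_iff] using h
  have hb : (((pf.length : Int)) == 0) = false := by
    simp [hl]
  unfold get_divisors_from_prime_factors_alt
  simp only [PySem.List.len_eq, hb, Bool.false_eq_true, if_false]
  rw [size_loop, PySem.List.length_pyRange_one]
  have hm : ((pf.length : Int) - 1).toNat = pf.length - 1 := by omega
  rw [hm]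
  rw [show [((1 : Int), pf)] = (combosT pf 0).map gmapP by rw [combosT_zero]; rfl]
  rw [iterSeq_combosT pf (pf.length - 1) 0]
  have harr : ∀ (a : Nat), 0 + 1 + a = a + 1 := fun a => by omega
  simp only [harr]

-- ===== VERDICT (by name: the statement is the Claim_ definition above) =====
theorem get_divisors_from_prime_factors_spec : Claim_equal_get_divisors_from_prime_factors := by
  intro pf _
  show get_divisors_from_prime_factors pf = get_divisors_from_prime_factors_alt pf
  by_cases hpf : pf = []
  · subst hpf; rfl
  · rw [A_norm, B_norm pf hpf]
    have hl : pf.length ≠ 0 := by simpa [List.length_eq_zero_iff] using hpf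
    set m := pf.length - 1 with hmdef
    rw [show pf.length = m + 1 by omega, List.range_succ_eq_map]
    simp only [List.flatMap_cons, List.flatMap_map,
      PySem.List.combinations_zero, List.map_cons, List.map_nil]
    rw [show prodF [] = 1 from rfl]
    rw [PySem.Set.update_append, PySem.Set.update_cons, PySem.Set.update_nil]
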